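-- pv_equiv track=rewrite | github.com/mickeypash/aoc | 2020/day5.py | get_column
-- ===== SOURCE A (Python) =====
-- def get_column(chars: int, columns=list(range(8))):
--
--     if len(chars) == 1:
--         return columns[0] if chars == "L" else columns[1]
--
--     mid = len(columns) // 2
--     if chars[0] == "L":
--         return get_column(chars[1:], columns[:mid])
--     if chars[0] == "R":
--         return get_column(chars[1:], columns[mid:])
-- ===== SOURCE B (Python) =====
-- def get_column(chars, columns=list(range(8))):
--     start, n = 0, len(columns)
--     for c in chars[:-1]:
--         half = n // 2
--         if c == "L":
--             n = half
--         else: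
--             start += half
--             n -= half
--     return columns[start] if chars[-1] == "L" else columns[start + 1]
-- ===== Notes on version B (the rewrite author's own statement) =====
-- stated objective: alternative
-- what changed: B replaces A's recursive list-slicing binary partition with a single iterative pass that tracks a (start, length) index window into the untouched columns list and does one final index lookup, so no intermediate lists are built.
-- outside the precondition, e.g. on get_column('ab', [0, 1]): A returns None, B raises IndexError; on get_column('XL', [0, 1]): A returns None, B returns 1
import Mathlib
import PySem

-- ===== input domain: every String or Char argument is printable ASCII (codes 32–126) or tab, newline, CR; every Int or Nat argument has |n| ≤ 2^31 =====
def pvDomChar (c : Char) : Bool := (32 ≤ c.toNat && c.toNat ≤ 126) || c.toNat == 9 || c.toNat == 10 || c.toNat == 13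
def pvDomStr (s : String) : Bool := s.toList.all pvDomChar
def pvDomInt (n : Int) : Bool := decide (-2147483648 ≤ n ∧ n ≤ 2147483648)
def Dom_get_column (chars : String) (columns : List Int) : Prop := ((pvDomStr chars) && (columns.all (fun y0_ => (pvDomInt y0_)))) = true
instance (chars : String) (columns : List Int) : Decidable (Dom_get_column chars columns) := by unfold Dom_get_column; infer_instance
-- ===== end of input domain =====

-- B replaces A's recursive list-slicing binary partition by an iterative (start, length) index
-- window over the untouched columns list; same value on every input where A returns an int.

-- ===== PORT A =====
-- recursion on the character list; `none` = Python returned None (non-'L'/'R' char) or raised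
-- (empty string, final index out of range).  columns[:mid] / columns[mid:] with 0 ≤ mid ≤ len
-- are exactly take/drop (PySem.List.slice_to_natCast / slice_from_natCast).
def get_column_go : List Char → List Int → Option Int
  | [], _ => none                                   -- chars[0] raises IndexError
  | [c], columns =>
      -- len(chars) == 1: `chars == "L"` ↔ the single char is 'L'
      if c = 'L' then PySem.List.pyGet? columns 0 else PySem.List.pyGet? columns 1
  | c :: rest, columns =>
      let mid := columns.length / 2                 -- len(columns) // 2, nonneg so Nat / is exact
      if c = 'L' then get_column_go rest (columns.take mid)
      else if c = 'R' then get_column_go rest (columns.drop mid)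
      else none                                     -- falls off the end: returns None

def get_column (chars : String) (columns : List Int) : Int :=
  (get_column_go chars.toList columns).getD 0       -- 0 is junk outside Pre_ (A raises / returns None there)

-- ===== PORT B =====
-- the loop `for c in chars[:-1]` updating (start, n); values are nonnegative Python ints,
-- represented as Nat (n // 2 on a nonneg int is Nat division, exact)
def gcAltLoop : List Char → Nat × Nat → Nat × Nat
  | [], p => p
  | c :: rest, (start, n) =>
      let half := n / 2
      gcAltLoop rest (if c = 'L' then (start, half) else (start + half, n - half))

def get_column_alt (chars : String) (columns : List Int) : Int :=
  let cs := chars.toList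
  let p := gcAltLoop cs.dropLast (0, columns.length)
  match cs.getLast? with
  | none => 0                                       -- empty chars: Python B raises IndexError (outside Pre_)
  | some c =>
      (if c = 'L' then PySem.List.pyGet? columns (p.1 : Int)
       else PySem.List.pyGet? columns ((p.1 : Int) + 1)).getD 0

-- ===== PRECONDITION & SPEC =====
-- binary value of the non-final chars, first char least significant ('L' = 0, anything else = 1)
def pvBits : List Char → Nat
  | [] => 0
  | c :: rest => (if c = 'L' then 0 else 1) + 2 * pvBits rest

-- Pre_ = exactly the inputs where A returns an int: chars nonempty, every char but the last is
-- 'L'/'R' (otherwise A returns None), and the final partition cell — whose size has the closed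
-- form (len(columns) + bits)/2^k — is big enough for the final index (otherwise A raises IndexError).
def Pre_get_column (chars : String) (columns : List Int) : Prop :=
  chars.toList ≠ [] ∧
  chars.toList.dropLast.all (fun c => c == 'L' || c == 'R') = true ∧
  (if chars.toList.getLast? = some 'L' then 1 else 2) ≤
    (columns.length + pvBits chars.toList.dropLast) / 2 ^ chars.toList.dropLast.length
instance (chars : String) (columns : List Int) : Decidable (Pre_get_column chars columns) := by
  unfold Pre_get_column; infer_instance

def pvWitness_get_column : String × List Int := ("RL", [0, 1, 2, 3])

def Spec_get_column (chars : String) (columns : List Int) (out : Int) : Prop := out = get_column_alt chars columns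
instance (chars : String) (columns : List Int) (out : Int) : Decidable (Spec_get_column chars columns out) := by unfold Spec_get_column; infer_instance

-- ===== CLAIM (what is proved, stated in full; the proofs are below) =====
def Claim_equal_get_column : Prop := ∀ (chars : String) (columns : List Int), Dom_get_column chars columns → Pre_get_column chars columns → Spec_get_column chars columns (get_column chars columns)

-- ===== LEMMAS AND PROOFS =====

-- one halving step of the cell-size formula
theorem pv_size_step (n v k : Nat) (c : Char) :
    ((if c = 'L' then n / 2 else n - n / 2) + v) / 2 ^ k
      = (n + ((if c = 'L' then 0 else 1) + 2 * v)) / 2 ^ (k + 1) := by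
  have h2 : (0:Nat) < 2 := by omega
  by_cases h : c = 'L'
  · simp only [h, reduceIte]
    have e : n / 2 + v = (n + (0 + 2 * v)) / 2 := by
      rw [show n + (0 + 2 * v) = n + v * 2 by ring, Nat.add_mul_div_right _ _ h2]
    rw [e, Nat.div_div_eq_div_mul, ← pow_succ']
  · simp only [if_neg h]
    have e : n - n / 2 + v = (n + (1 + 2 * v)) / 2 := by
      rw [show n + (1 + 2 * v) = (n + 1) + v * 2 by ring, Nat.add_mul_div_right _ _ h2]
      omega
    rw [e, Nat.div_div_eq_div_mul, ← pow_succ']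

-- main invariant: A run on the window columns[start : start+n] = B's index computation,
-- for a character list split as (prefix of 'L'/'R' chars) ++ [final char]
theorem pv_main (columns : List Int) :
    ∀ (pre : List Char) (c : Char) (start n : Nat),
    (∀ x ∈ pre, x = 'L' ∨ x = 'R') →
    start + n ≤ columns.length →
    (if c = 'L' then 1 else 2) ≤ (n + pvBits pre) / 2 ^ pre.length →
    (get_column_go (pre ++ [c]) ((columns.drop start).take n)).getD 0 =
      (if c = 'L' then PySem.List.pyGet? columns ((gcAltLoop pre (start, n)).1 : Int)
       else PySem.List.pyGet? columns (((gcAltLoop pre (start, n)).1 : Int) + 1)).getD 0 := by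
  intro pre
  induction pre with
  | nil =>
    intro c start n _ hle hnf
    simp only [pvBits, List.length_nil, pow_zero, Nat.div_one, Nat.add_zero] at hnf
    simp only [List.nil_append, get_column_go, gcAltLoop]
    by_cases hc : c = 'L'
    · simp only [hc, reduceIte] at hnf ⊢
      have hidx : ((columns.drop start).take n)[0]? = columns[start]? := by
        rw [List.getElem?_take, if_pos (by omega), List.getElem?_drop, Nat.add_zero]
      simp [PySem.List.pyGet?_zero, hidx]
    · simp only [if_neg hc] at hnf ⊢
      have hidx : ((columns.drop start).take n)[1]? = columns[start + 1]? := by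
        rw [List.getElem?_take, if_pos (by omega), List.getElem?_drop]
      have h1 : PySem.List.pyGet? ((columns.drop start).take n) 1
          = ((columns.drop start).take n)[1]? := by
        rw [show (1 : Int) = ((1 : Nat) : Int) by norm_num, PySem.List.pyGet?_natCast]
      have h2 : PySem.List.pyGet? columns ((start : Int) + 1) = columns[start + 1]? := by
        rw [show ((start : Int) + 1) = ((start + 1 : Nat) : Int) by push_cast; ring,
          PySem.List.pyGet?_natCast]
      rw [h1, hidx, h2]
  | cons p pre' ih =>
    intro c start n hLR hle hnf
    obtain ⟨d, t, e⟩ : ∃ d t, pre' ++ [c] = d :: t := by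
      cases pre' <;> exact ⟨_, _, rfl⟩
    have hp : p = 'L' ∨ p = 'R' := hLR p (List.mem_cons_self ..)
    have hLR' : ∀ x ∈ pre', x = 'L' ∨ x = 'R' := fun x hx => hLR x (List.mem_cons_of_mem _ hx)
    have hlen : ((columns.drop start).take n).length = n := by
      simp [List.length_take, List.length_drop]; omega
    -- cell-size hypothesis for the recursive call
    have hnf' : (if c = 'L' then 1 else 2) ≤
        ((if p = 'L' then n / 2 else n - n / 2) + pvBits pre') / 2 ^ pre'.length := by
      rw [pv_size_step]
      simpa only [pvBits, List.length_cons] using hnf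
    have hcons : (p :: pre') ++ [c] = p :: (pre' ++ [c]) := rfl
    rw [hcons, e]
    rcases hp with hp | hp <;> subst hp
    · -- 'L': window shrinks to its first half
      have htt : ((columns.drop start).take n).take (n / 2)
          = (columns.drop start).take (n / 2) := by
        rw [List.take_take]; congr 1; omega
      simp only [get_column_go, hlen]
      rw [if_pos trivial, htt, ← e, ih c start (n / 2) hLR' (by omega) (by simpa using hnf')]
      try simp [gcAltLoop]
    · -- 'R': window shrinks to its second half
      have htd : ((columns.drop start).take n).drop (n / 2)
          = (columns.drop (start + n / 2)).take (n - n / 2) := by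
        rw [List.drop_take, List.drop_drop]
      simp only [get_column_go, hlen]
      rw [if_neg (by decide : ¬ ('R' : Char) = 'L'), if_pos trivial, htd, ← e,
        ih c (start + n / 2) (n - n / 2) hLR' (by omega) (by simpa using hnf')]
      try simp [gcAltLoop]

-- ===== VERDICT (by name: the statement is the Claim_ definition above) =====
theorem get_column_spec : Claim_equal_get_column := by
  intro chars columns _ pre
  obtain ⟨hne, hLR, hnf⟩ := pre
  obtain ⟨pr, c, hcs⟩ : ∃ pr c, chars.toList = pr ++ [c] :=
    ⟨chars.toList.dropLast, chars.toList.getLast hne,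
      (List.dropLast_append_getLast hne).symm⟩
  rw [hcs] at hLR hnf
  simp only [List.dropLast_concat, List.getLast?_concat] at hLR hnf
  have hLR' : ∀ x ∈ pr, x = 'L' ∨ x = 'R' := by simpa using hLR
  unfold Spec_get_column get_column get_column_alt
  rw [hcs]
  simp only [List.dropLast_concat, List.getLast?_concat]
  have := pv_main columns pr c 0 columns.length hLR' (by omega)
    (by by_cases h : c = 'L' <;> simpa [h] using hnf)
  rw [show columns.drop 0 = columns from rfl, List.take_length] at this
  rw [this]
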